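-- pv_equiv track=rewrite | github.com/jz33/LeetCodeSolutions | 665 Non-decreasing Array.py | checkPossibility
-- ===== SOURCE A (Python) =====
-- from typing import List
--
-- def checkPossibility(nums: List[int]) -> bool:
--     # Count of ascending subarray
--     c = 0
--     # Index of first break point
--     b = -1
--     for i, e in enumerate(nums):
--         if i > 0 and e < nums[i-1]:
--             c += 1
--             b = i
--         if c > 1:
--             return False
--
--     if c == 0:
--         return True
--
--     # Try modify nums[b] to nums[b-1]
--     # or mofidy nums[b-1] to nums[b]
--     # b and b-1 must exist
--     return (b + 1 >= len(nums) or nums[b-1] <= nums[b+1]) or (b - 2 < 0 or nums[b] >= nums[b-2])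
-- ===== SOURCE B (Python) =====
-- def checkPossibility(nums):
--     # Canonical greedy one-pass repair: carry the repaired values at i-2 and i-1
--     # (p2, p1); on a violation decide inline whether to lower the left neighbour
--     # or raise the current element, and fail on a second violation.
--     count = 0
--     p2 = None  # repaired value two positions back
--     p1 = None  # repaired value one position back
--     for e in nums:
--         if p1 is None:
--             p1 = e
--             continue
--         if e < p1:
--             count += 1
--             if count > 1:
--                 return False
--             if p2 is None or p2 <= e:
--                 p2, p1 = e, e
--             else:
--                 p2, p1 = p1, p1
--         else:
--             p2, p1 = p1, e
--     return True
-- ===== Notes on version B (the rewrite author's own statement) =====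
-- stated objective: idiomatic
-- what changed: Replaced A's scheme of counting breaks while remembering the break index and then testing a four-way index-arithmetic disjunction after the loop by the canonical greedy single-pass repair that carries the repaired values of the last two positions and decides the fix inline at each violation.
import Mathlib
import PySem

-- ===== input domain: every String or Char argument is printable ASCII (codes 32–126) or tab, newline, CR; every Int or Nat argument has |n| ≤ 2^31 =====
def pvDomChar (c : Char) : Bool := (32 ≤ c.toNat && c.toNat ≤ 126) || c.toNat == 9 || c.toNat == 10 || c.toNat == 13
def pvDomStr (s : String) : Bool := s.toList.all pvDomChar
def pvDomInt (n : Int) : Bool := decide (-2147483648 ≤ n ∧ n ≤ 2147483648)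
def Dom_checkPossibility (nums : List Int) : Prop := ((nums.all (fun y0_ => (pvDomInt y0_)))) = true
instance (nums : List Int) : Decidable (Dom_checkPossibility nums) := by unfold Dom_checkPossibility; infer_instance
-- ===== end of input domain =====

-- B replaces A's count-breaks-then-test-a-final-disjunction scheme by the canonical
-- greedy one-pass repair (carrying the repaired last two values); objective: idiomatic.


-- ===== PORT A =====
-- A's for-loop over enumerate(nums) with state (c, b); `none` = the early `return False`
-- (the `if c > 1` test is placed in each branch with the value c has there)
def aLoop (nums : List Int) : List (Int × Int) → Int → Int → Option (Int × Int)
  | [], c, b => some (c, b)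
  | (i, e) :: rest, c, b =>
    if 0 < i ∧ e < PySem.List.pyGetD nums (i - 1) 0 then
      (if c + 1 > 1 then none else aLoop nums rest (c + 1) i)
    else
      (if c > 1 then none else aLoop nums rest c b)

-- A's final `return (... or ...) or (... or ...)`; every pyGetD access is guarded in range
def aFinal (nums : List Int) (b : Int) : Bool :=
  (decide (b + 1 ≥ (nums.length : Int)) ||
      decide (PySem.List.pyGetD nums (b - 1) 0 ≤ PySem.List.pyGetD nums (b + 1) 0)) ||
    (decide (b - 2 < 0) ||
      decide (PySem.List.pyGetD nums b 0 ≥ PySem.List.pyGetD nums (b - 2) 0))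

def checkPossibility (nums : List Int) : Bool :=
  match aLoop nums (PySem.List.enumerate nums 0) 0 (-1) with
  | none => false
  | some (c, b) => if c = 0 then true else aFinal nums b

-- ===== PORT B =====
-- B's loop: p2/p1 are the repaired values two/one positions back (none = Python's None)
def bLoop : List Int → Option Int → Option Int → Int → Bool
  | [], _, _, _ => true
  | e :: rest, p2, p1, count =>
    match p1 with
    | none => bLoop rest p2 (some e) count
    | some p1v =>
      if e < p1v then
        if count + 1 > 1 then false
        else
          match p2 with
          | none => bLoop rest (some e) (some e) (count + 1)
          | some p2v =>
            if p2v ≤ e then bLoop rest (some e) (some e) (count + 1)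
            else bLoop rest (some p1v) (some p1v) (count + 1)
      else bLoop rest (some p1v) (some e) count

def checkPossibility_alt (nums : List Int) : Bool := bLoop nums none none 0

-- ===== PRECONDITION & SPEC =====
def Spec_checkPossibility (nums : List Int) (out : Bool) : Prop := out = checkPossibility_alt nums
instance (nums : List Int) (out : Bool) : Decidable (Spec_checkPossibility nums out) := by unfold Spec_checkPossibility; infer_instance

-- ===== CLAIM (what is proved, stated in full; the proofs are below) =====
def Claim_equal_checkPossibility : Prop := ∀ (nums : List Int), Dom_checkPossibility nums → Spec_checkPossibility nums (checkPossibility nums)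

-- ===== LEMMAS AND PROOFS =====

-- Boolean "prev :: l is nondecreasing" (what both loops test after the first break)
def chainB : Int → List Int → Bool
  | _, [] => true
  | p, e :: rest => decide (p ≤ e) && chainB e rest

lemma drop_head (nums : List Int) (k : Nat) (x : Int) (l : List Int)
    (hd : nums.drop k = x :: l) : nums[k]? = some x := by
  have h : (nums.drop k)[0]? = nums[k + 0]? := List.getElem?_drop
  rw [hd] at h
  simpa using h.symm

lemma drop_tail (nums : List Int) (k : Nat) (x : Int) (l : List Int)
    (hd : nums.drop k = x :: l) : nums.drop (k + 1) = l := by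
  have h : nums.drop (k + 1) = (nums.drop k).drop 1 := by
    rw [List.drop_drop]
  rw [h, hd]
  rfl

lemma getD_of_drop (nums : List Int) (k : Nat) (x : Int) (l : List Int)
    (hd : nums.drop k = x :: l) : nums.getD k 0 = x := by
  rw [List.getD_eq_getElem?_getD, drop_head nums k x l hd]
  rfl

lemma cast_sub_one (k : Nat) (hk : 1 ≤ k) : (k : Int) - 1 = ((k - 1 : Nat) : Int) := by
  omega

lemma cast_add_one (k : Nat) : (k : Int) + 1 = ((k + 1 : Nat) : Int) := by
  push_cast; ring

-- A's loop with c = 1 already: returns `some` iff the remaining suffix keeps the chain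
lemma aLoop_one (l : List Int) : ∀ (nums : List Int) (k : Nat) (prev b : Int),
    nums.drop (k - 1) = prev :: l → 1 ≤ k →
    aLoop nums (PySem.List.enumerate l (k : Int)) 1 b =
      if chainB prev l then some (1, b) else none := by
  induction l with
  | nil =>
    intro nums k prev b hd hk
    simp [aLoop, chainB, PySem.List.enumerate_nil]
  | cons e rest ih =>
    intro nums k prev b hd hk
    have hgetD : PySem.List.pyGetD nums ((k : Int) - 1) 0 = prev := by
      rw [cast_sub_one k hk, PySem.List.pyGetD_natCast]
      exact getD_of_drop nums (k - 1) prev (e :: rest) hd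
    have hdk : nums.drop k = e :: rest := by
      have := drop_tail nums (k - 1) prev (e :: rest) hd
      have hkk : k - 1 + 1 = k := by omega
      rwa [hkk] at this
    have hk0 : k ≠ 0 := by omega
    rw [PySem.List.enumerate_cons]
    by_cases hlt : e < prev
    · have hn2 : ¬ prev ≤ e := by omega
      rw [show aLoop nums (((k : Int), e) :: PySem.List.enumerate rest ((k : Int) + 1)) 1 b = none by
        simp [aLoop, hgetD, hlt, hk0]]
      simp [chainB, hn2]
    · have hle : prev ≤ e := by omega
      have step : aLoop nums (((k : Int), e) :: PySem.List.enumerate rest ((k : Int) + 1)) 1 b =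
          aLoop nums (PySem.List.enumerate rest ((k : Int) + 1)) 1 b := by
        simp [aLoop, hgetD, hlt]
      rw [step, cast_add_one k]
      rw [ih nums (k + 1) e b (by simpa using hdk) (by omega)]
      simp [chainB, hle]

-- B's loop with count = 1 already: succeeds iff the remaining suffix keeps the chain
lemma bLoop_one (l : List Int) : ∀ (p2v p1v : Int),
    bLoop l (some p2v) (some p1v) 1 = chainB p1v l := by
  induction l with
  | nil => intro p2v p1v; simp [bLoop, chainB]
  | cons e rest ih =>
    intro p2v p1v
    by_cases hlt : e < p1v
    · have hn : ¬ p1v ≤ e := by omega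
      simp [bLoop, hlt, chainB, hn]
    · have hle : p1v ≤ e := by omega
      simp [bLoop, hlt, ih p1v e, chainB, hle]

-- synchronized phase-0 invariant: before the first break both loops agree
lemma phase0 (l : List Int) : ∀ (nums : List Int) (k : Nat) (p1 : Int) (p2 : Option Int),
    nums.drop (k - 1) = p1 :: l → 1 ≤ k →
    (p2 = none → k = 1) →
    (∀ v, p2 = some v → 2 ≤ k ∧ nums[k - 2]? = some v) →
    (match aLoop nums (PySem.List.enumerate l (k : Int)) 0 (-1) with
      | none => false
      | some (c, b) => if c = 0 then true else aFinal nums b) = bLoop l p2 (some p1) 0 := by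
  induction l with
  | nil =>
    intro nums k p1 p2 hd hk hnone hsome
    simp [aLoop, bLoop, PySem.List.enumerate_nil]
  | cons e rest ih =>
    intro nums k p1 p2 hd hk hnone hsome
    have hgetD : PySem.List.pyGetD nums ((k : Int) - 1) 0 = p1 := by
      rw [cast_sub_one k hk, PySem.List.pyGetD_natCast]
      exact getD_of_drop nums (k - 1) p1 (e :: rest) hd
    have hdk : nums.drop k = e :: rest := by
      have := drop_tail nums (k - 1) p1 (e :: rest) hd
      have hkk : k - 1 + 1 = k := by omega
      rwa [hkk] at this
    have hgk : nums.getD k 0 = e := getD_of_drop nums k e rest hdk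
    have hlen : nums.length = k + 1 + rest.length := by
      have := congrArg List.length hdk
      simp [List.length_drop] at this
      omega
    rw [PySem.List.enumerate_cons]
    by_cases hlt : e < p1
    · -- the first break: A records (1, k) and scans on; B repairs and scans on
      have hk0 : k ≠ 0 := by omega
      have step : aLoop nums (((k : Int), e) :: PySem.List.enumerate rest ((k : Int) + 1)) 0 (-1) =
          aLoop nums (PySem.List.enumerate rest ((k : Int) + 1)) 1 (k : Int) := by
        simp [aLoop, hgetD, hlt, hk0]
      rw [step, cast_add_one k,
        aLoop_one rest nums (k + 1) e (k : Int) (by simpa using hdk) (by omega)]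
      -- A's overall value is now: if chainB e rest then aFinal nums k else false
      have hAgk : PySem.List.pyGetD nums (k : Int) 0 = e := by
        rw [PySem.List.pyGetD_natCast]; exact hgk
      cases p2 with
      | none =>
        have hk1 : k = 1 := hnone rfl
        have hfin : aFinal nums (k : Int) = true := by
          subst hk1
          simp [aFinal]
        have hB : bLoop (e :: rest) none (some p1) 0 = chainB e rest := by
          simp [bLoop, hlt, bLoop_one]
        rw [hB]
        by_cases hch : chainB e rest = true <;> simp [hch, hfin]
      | some p2v =>
        obtain ⟨hk2, hg2⟩ := hsome p2v rfl
        have hg2D : PySem.List.pyGetD nums ((k : Int) - 2) 0 = p2v := by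
          rw [show (k : Int) - 2 = ((k - 2 : Nat) : Int) by omega, PySem.List.pyGetD_natCast]
          rw [List.getD_eq_getElem?_getD, hg2]; rfl
        by_cases hp2 : p2v ≤ e
        · -- favourable break: A's second disjunct nums[b] ≥ nums[b-2] holds
          have hfin : aFinal nums (k : Int) = true := by
            have h2 : ¬ ((k : Int) - 2 < 0) := by omega
            simp [aFinal, hAgk, hg2D, h2, ge_iff_le, hp2]
          have hB : bLoop (e :: rest) (some p2v) (some p1) 0 = chainB e rest := by
            simp [bLoop, hlt, hp2, bLoop_one]
          rw [hB]
          by_cases hch : chainB e rest = true <;> simp [hch, hfin]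
        · -- unfavourable break: B raises e to p1; A's fate rests on nums[b-1] ≤ nums[b+1]
          have hB : bLoop (e :: rest) (some p2v) (some p1) 0 = chainB p1 rest := by
            simp [bLoop, hlt, hp2, bLoop_one]
          rw [hB]
          cases rest with
          | nil =>
            have hfin : aFinal nums (k : Int) = true := by
              have hlen' : nums.length = k + 1 := by simpa using hlen
              have h1 : (k : Int) + 1 ≥ (nums.length : Int) := by rw [hlen']; push_cast; omega
              simp [aFinal, h1]
            simp [hfin, chainB]
          | cons r rs =>
            have hgr : nums.getD (k + 1) 0 = r :=
              getD_of_drop nums (k + 1) r rs (drop_tail nums k e (r :: rs) hdk)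
            have hfin : aFinal nums (k : Int) = decide (p1 ≤ r) := by
              have hblen : ¬ ((k : Int) + 1 ≥ (nums.length : Int)) := by
                have hlen2 : nums.length = k + 2 + rs.length := by simp at hlen; omega
                rw [hlen2]; push_cast; omega
              have hgrD : PySem.List.pyGetD nums ((k : Int) + 1) 0 = r := by
                rw [cast_add_one k, PySem.List.pyGetD_natCast]; exact hgr
              have h2 : ¬ ((k : Int) - 2 < 0) := by omega
              simp [aFinal, hblen, hgetD, hgrD, hAgk, hg2D, h2, ge_iff_le, hp2]
            by_cases hch : chainB e (r :: rs) = true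
            · simp only [chainB, Bool.and_eq_true, decide_eq_true_eq] at hch
              simp [hch.1, hch.2, hfin, chainB]
            · have hrs : chainB p1 (r :: rs) = false := by
                by_cases hpr : p1 ≤ r
                · have her : e ≤ r := by omega
                  have hcr : chainB r rs = false := by
                    cases hcr2 : chainB r rs
                    · rfl
                    · exact absurd (by simp [chainB, her, hcr2]) hch
                  simp [chainB, hcr]
                · simp [chainB, hpr]
              simp [hch, hrs]
    · -- no break at this position: both loops advance in lockstep
      have step : aLoop nums (((k : Int), e) :: PySem.List.enumerate rest ((k : Int) + 1)) 0 (-1) =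
          aLoop nums (PySem.List.enumerate rest ((k : Int) + 1)) 0 (-1) := by
        simp [aLoop, hgetD, hlt]
      have hB : bLoop (e :: rest) p2 (some p1) 0 = bLoop rest (some p1) (some e) 0 := by
        simp [bLoop, hlt]
      rw [step, cast_add_one k, hB]
      refine ih nums (k + 1) e (some p1) (by simpa using hdk) (by omega)
        (by intro h; cases h) ?_
      intro v hv
      cases hv
      refine ⟨by omega, ?_⟩
      have : k + 1 - 2 = k - 1 := by omega
      rw [this]
      exact drop_head nums (k - 1) p1 (e :: rest) hd

-- ===== VERDICT (by name: the statement is the Claim_ definition above) =====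
theorem checkPossibility_spec : Claim_equal_checkPossibility := by
  intro nums _
  unfold Spec_checkPossibility checkPossibility checkPossibility_alt
  cases nums with
  | nil => simp [aLoop, bLoop, PySem.List.enumerate_nil]
  | cons x rest =>
    have step : aLoop (x :: rest) (PySem.List.enumerate (x :: rest) 0) 0 (-1) =
        aLoop (x :: rest) (PySem.List.enumerate rest ((1 : Nat) : Int)) 0 (-1) := by
      rw [PySem.List.enumerate_cons]
      simp [aLoop]
    have hB : bLoop (x :: rest) none none 0 = bLoop rest none (some x) 0 := by
      simp [bLoop]
    rw [step, hB]
    exact phase0 rest (x :: rest) 1 x none (by simp) (by omega)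
      (fun _ => rfl) (by intro v hv; cases hv)
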